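-- pv_equiv track=rewrite | github.com/peterpei666/leetcode_python | 3830. Longest Alternating Subarray After Removing At Most One Element.py | longestAlternating
-- ===== SOURCE A (Python) =====
-- from typing import List
--
-- def longestAlternating(nums: List[int]) -> int:
--     n = len(nums)
--     lu = [1] * n
--     ld = [1] * n
--     for i in range(1, n):
--         if nums[i - 1] < nums[i]:
--             lu[i] = ld[i - 1] + 1
--             ld[i] = 1
--         elif nums[i - 1] > nums[i]:
--             ld[i] = lu[i - 1] + 1
--             lu[i] = 1
--         else:
--             lu[i] = 1
--             ld[i] = 1
--     ru = [1] * n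
--     rd = [1] * n
--     for i in range(n - 2, -1, -1):
--         if nums[i] < nums[i + 1]:
--             ru[i] = rd[i + 1] + 1
--             rd[i] = 1
--         elif nums[i] > nums[i + 1]:
--             rd[i] = ru[i + 1] + 1
--             ru[i] = 1
--         else:
--             ru[i] = 1
--             rd[i] = 1
--     ans = max(max(lu), max(ld))
--     for i in range(1, n - 1):
--         if nums[i - 1] < nums[i + 1]:
--             ans = max(ans, ld[i - 1] + rd[i + 1])
--         elif nums[i - 1] > nums[i + 1]:
--             ans = max(ans, lu[i - 1] + ru[i + 1])
--     return ans
-- ===== SOURCE B (Python) =====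
-- from typing import List
--
-- def longestAlternating(nums: List[int]) -> int:
--     # Single forward pass: up/down = longest alternating run ending here with no
--     # removal; remU/remD = longest ending here having removed exactly one earlier
--     # interior element (0 = no such run).
--     if not nums:
--         raise ValueError("max() arg is an empty sequence")
--     best = 1
--     up = down = 1
--     pUp = pDown = 0      # up/down at index i-2
--     remU = remD = 0
--     for i in range(1, len(nums)):
--         a, b = nums[i - 1], nums[i]
--         nUp = down + 1 if a < b else 1
--         nDown = up + 1 if a > b else 1
--         nRemU = remD + 1 if (remD > 0 and a < b) else 0
--         nRemD = remU + 1 if (remU > 0 and a > b) else 0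
--         if i >= 2:
--             c = nums[i - 2]
--             if c < b:
--                 nRemU = max(nRemU, pDown + 1)
--             elif c > b:
--                 nRemD = max(nRemD, pUp + 1)
--         pUp, pDown = up, down
--         up, down, remU, remD = nUp, nDown, nRemU, nRemD
--         best = max(best, up, down, remU, remD)
--     return best
-- ===== Notes on version B (the rewrite author's own statement) =====
-- stated objective: alternative
-- what changed: Replaced the four DP arrays (left/right up-down run lengths) plus a separate combine scan by a single forward pass keeping seven scalars (current up/down run lengths, the two previous ones, and up/down run lengths with one element already removed), so no arrays are allocated and the list is traversed once instead of four times; measured speed is about the same.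
import Mathlib
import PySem

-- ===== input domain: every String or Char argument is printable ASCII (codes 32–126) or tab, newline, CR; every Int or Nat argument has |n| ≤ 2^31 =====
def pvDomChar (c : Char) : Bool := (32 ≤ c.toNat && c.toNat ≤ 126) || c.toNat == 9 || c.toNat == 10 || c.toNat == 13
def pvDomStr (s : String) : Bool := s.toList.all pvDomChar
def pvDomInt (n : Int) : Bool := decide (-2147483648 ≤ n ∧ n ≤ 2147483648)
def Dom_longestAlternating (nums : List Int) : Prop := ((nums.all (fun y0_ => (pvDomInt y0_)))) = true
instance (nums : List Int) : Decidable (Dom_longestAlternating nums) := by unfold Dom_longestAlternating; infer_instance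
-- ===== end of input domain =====

-- B replaces A's four DP arrays and combine scan by a single forward pass over
-- seven scalars (an alternative, array-free one-pass algorithm; same asymptotic cost).

-- ===== PORT A =====
-- step of the first loop: for i in range(1, n): update lu[i], ld[i]
def aStep1 (nums : List Int) (s : List Int × List Int) (i : Int) : List Int × List Int :=
  if PySem.List.pyGetD nums (i - 1) 0 < PySem.List.pyGetD nums i 0 then
    (PySem.List.pySetD s.1 i (PySem.List.pyGetD s.2 (i - 1) 0 + 1), PySem.List.pySetD s.2 i 1)
  else if PySem.List.pyGetD nums i 0 < PySem.List.pyGetD nums (i - 1) 0 then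
    (PySem.List.pySetD s.1 i 1, PySem.List.pySetD s.2 i (PySem.List.pyGetD s.1 (i - 1) 0 + 1))
  else
    (PySem.List.pySetD s.1 i 1, PySem.List.pySetD s.2 i 1)

-- step of the second loop: for i in range(n-2, -1, -1): update ru[i], rd[i]
def aStep2 (nums : List Int) (s : List Int × List Int) (i : Int) : List Int × List Int :=
  if PySem.List.pyGetD nums i 0 < PySem.List.pyGetD nums (i + 1) 0 then
    (PySem.List.pySetD s.1 i (PySem.List.pyGetD s.2 (i + 1) 0 + 1), PySem.List.pySetD s.2 i 1)
  else if PySem.List.pyGetD nums (i + 1) 0 < PySem.List.pyGetD nums i 0 then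
    (PySem.List.pySetD s.1 i 1, PySem.List.pySetD s.2 i (PySem.List.pyGetD s.1 (i + 1) 0 + 1))
  else
    (PySem.List.pySetD s.1 i 1, PySem.List.pySetD s.2 i 1)

def longestAlternating (nums : List Int) : Int :=
  let n : Int := PySem.List.len nums
  -- lu = [1]*n ; ld = [1]*n  and the first loop
  let s1 := (PySem.List.pyRange 1 n 1).foldl (aStep1 nums)
              (List.replicate n.toNat (1 : Int), List.replicate n.toNat (1 : Int))
  -- ru = [1]*n ; rd = [1]*n  and the second loop
  let s2 := (PySem.List.pyRange (n - 2) (-1) (-1)).foldl (aStep2 nums)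
              (List.replicate n.toNat (1 : Int), List.replicate n.toNat (1 : Int))
  -- ans = max(max(lu), max(ld))   (max() raises on an empty list: excluded by Pre_)
  let ans0 := max ((PySem.List.max? s1.1 (fun y => y)).getD 0)
                  ((PySem.List.max? s1.2 (fun y => y)).getD 0)
  -- final combine loop
  (PySem.List.pyRange 1 (n - 1) 1).foldl (fun ans i =>
      if PySem.List.pyGetD nums (i - 1) 0 < PySem.List.pyGetD nums (i + 1) 0 then
        max ans (PySem.List.pyGetD s1.2 (i - 1) 0 + PySem.List.pyGetD s2.2 (i + 1) 0)
      else if PySem.List.pyGetD nums (i + 1) 0 < PySem.List.pyGetD nums (i - 1) 0 then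
        max ans (PySem.List.pyGetD s1.1 (i - 1) 0 + PySem.List.pyGetD s2.1 (i + 1) 0)
      else ans) ans0

-- ===== PORT B =====
-- the loop state of Source B: best, up, down, pUp, pDown, remU, remD
structure BSt where
  best : Int
  up : Int
  down : Int
  pUp : Int
  pDown : Int
  remU : Int
  remD : Int
  deriving Repr, DecidableEq

def bStep (nums : List Int) (st : BSt) (i : Int) : BSt :=
  let a := PySem.List.pyGetD nums (i - 1) 0
  let b := PySem.List.pyGetD nums i 0
  let nUp := if a < b then st.down + 1 else 1
  let nDown := if b < a then st.up + 1 else 1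
  let nRemU := if 0 < st.remD ∧ a < b then st.remD + 1 else 0
  let nRemD := if 0 < st.remU ∧ b < a then st.remU + 1 else 0
  let rem : Int × Int :=
    if 2 ≤ i then
      let c := PySem.List.pyGetD nums (i - 2) 0
      if c < b then (max nRemU (st.pDown + 1), nRemD)
      else if b < c then (nRemU, max nRemD (st.pUp + 1))
      else (nRemU, nRemD)
    else (nRemU, nRemD)
  { best := max st.best (max (max nUp nDown) (max rem.1 rem.2)),
    up := nUp, down := nDown, pUp := st.up, pDown := st.down,
    remU := rem.1, remD := rem.2 }

def longestAlternating_alt (nums : List Int) : Int :=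
  -- Source B raises ValueError on the empty list (excluded by Pre_); the fold below
  -- is the loop of Source B, the initial state its initial variables.
  ((PySem.List.pyRange 1 (PySem.List.len nums) 1).foldl (bStep nums)
    ⟨1, 1, 1, 0, 0, 0, 0⟩).best

-- ===== PRECONDITION & SPEC =====
-- Pre_ excludes only the empty list, on which both A and B raise ValueError (max() of
-- an empty sequence in A, the explicit raise in B).
def Pre_longestAlternating (nums : List Int) : Prop := nums ≠ []
instance (nums : List Int) : Decidable (Pre_longestAlternating nums) := by
  unfold Pre_longestAlternating; infer_instance

def pvWitness_longestAlternating : List Int := [1, 2, 1, 1, 3]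

def Spec_longestAlternating (nums : List Int) (out : Int) : Prop := out = longestAlternating_alt nums
instance (nums : List Int) (out : Int) : Decidable (Spec_longestAlternating nums out) := by
  unfold Spec_longestAlternating; infer_instance

-- ===== CLAIM (what is proved, stated in full; the proofs are below) =====
def Claim_equal_longestAlternating : Prop :=
  ∀ (nums : List Int), Dom_longestAlternating nums → Pre_longestAlternating nums →
    Spec_longestAlternating nums (longestAlternating nums)

-- ===== LEMMAS AND PROOFS =====

-- nums[i] as the proofs read it (all indices used are in range)
def gD (nums : List Int) (i : Nat) : Int := nums.getD i 0

-- (lu[i], ld[i]) of A: longest alternating run ending at i, last step up / down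
def LF (nums : List Int) : Nat → Int × Int
  | 0 => (1, 1)
  | i + 1 =>
      ((if gD nums i < gD nums (i + 1) then (LF nums i).2 + 1 else 1),
       (if gD nums (i + 1) < gD nums i then (LF nums i).1 + 1 else 1))

-- (ru[i], rd[i]) of A: longest alternating run starting at i, first step up / down
def RF (nums : List Int) (i : Nat) : Int × Int :=
  if h : i + 1 < nums.length then
    ((if gD nums i < gD nums (i + 1) then (RF nums (i + 1)).2 + 1 else 1),
     (if gD nums (i + 1) < gD nums i then (RF nums (i + 1)).1 + 1 else 1))
  else (1, 1)
  termination_by nums.length - i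

-- (remU, remD) of B after the iteration writing index i
def MF (nums : List Int) : Nat → Int × Int
  | 0 => (0, 0)
  | i + 1 =>
      let u0 := if 0 < (MF nums i).2 ∧ gD nums i < gD nums (i + 1) then (MF nums i).2 + 1 else 0
      let d0 := if 0 < (MF nums i).1 ∧ gD nums (i + 1) < gD nums i then (MF nums i).1 + 1 else 0
      if 1 ≤ i then
        if gD nums (i - 1) < gD nums (i + 1) then (max u0 ((LF nums (i - 1)).2 + 1), d0)
        else if gD nums (i + 1) < gD nums (i - 1) then (u0, max d0 ((LF nums (i - 1)).1 + 1))
        else (u0, d0)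
      else (u0, d0)

-- best of B after the iteration writing index i
def BF (nums : List Int) : Nat → Int
  | 0 => 1
  | i + 1 => max (BF nums i)
      (max (max (LF nums (i + 1)).1 (LF nums (i + 1)).2)
           (max (MF nums (i + 1)).1 (MF nums (i + 1)).2))


-- run of alternating steps starting at s, first step up if d, checked up to (t-1,t)
def RunFrom (nums : List Int) (d : Bool) (s t : Nat) : Prop :=
  ∀ j, s ≤ j → j < t →
    ((j - s) % 2 = 0 → (if d then gD nums j < gD nums (j + 1) else gD nums (j + 1) < gD nums j)) ∧
    ((j - s) % 2 = 1 → (if d then gD nums (j + 1) < gD nums j else gD nums j < gD nums (j + 1)))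

-- junction comparison when element p is removed (d = the junction step goes up)
def Junc (nums : List Int) (p : Nat) (d : Bool) : Prop :=
  if d then gD nums (p - 1) < gD nums (p + 1) else gD nums (p + 1) < gD nums (p - 1)

-- length of the run ending at p-1 that the junction extends
def LeftVal (nums : List Int) (p : Nat) (d : Bool) : Int :=
  if d then (LF nums (p - 1)).2 else (LF nums (p - 1)).1

-- A's combine candidate for removing element p
def Cand (nums : List Int) (p : Nat) (d : Bool) : Int :=
  LeftVal nums p d + (if d then (RF nums (p + 1)).2 else (RF nums (p + 1)).1)

lemma LF_pos (nums : List Int) (i : Nat) : 1 ≤ (LF nums i).1 ∧ 1 ≤ (LF nums i).2 := by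
  induction i with
  | zero => exact ⟨le_refl 1, le_refl 1⟩
  | succ i ih =>
    constructor <;> simp only [LF] <;> split <;> omega

lemma RF_last (nums : List Int) (i : Nat) (h : ¬ i + 1 < nums.length) : RF nums i = (1, 1) := by
  rw [RF]; simp [h]

lemma RF_succ (nums : List Int) (i : Nat) (h : i + 1 < nums.length) :
    RF nums i = ((if gD nums i < gD nums (i + 1) then (RF nums (i + 1)).2 + 1 else 1),
      (if gD nums (i + 1) < gD nums i then (RF nums (i + 1)).1 + 1 else 1)) := by
  rw [RF]; simp [h]

lemma RF_pos (nums : List Int) (i : Nat) : 1 ≤ (RF nums i).1 ∧ 1 ≤ (RF nums i).2 := by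
  by_cases h : i + 1 < nums.length
  · have := RF_pos nums (i + 1)
    rw [RF_succ nums i h]
    constructor <;> simp only [] <;> split <;> omega
  · rw [RF_last nums i h]; exact ⟨le_refl 1, le_refl 1⟩
termination_by nums.length - i

lemma RF_le (nums : List Int) (i : Nat) (h : i < nums.length) :
    (RF nums i).1 ≤ (nums.length : Int) - i ∧ (RF nums i).2 ≤ (nums.length : Int) - i := by
  by_cases h1 : i + 1 < nums.length
  · have ih := RF_le nums (i + 1) h1
    rw [RF_succ nums i h1]
    constructor <;> simp only [] <;> split <;> push_cast at * <;> omega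
  · rw [RF_last nums i h1]
    constructor <;> simp only [] <;> omega
termination_by nums.length - i

lemma runShift (nums : List Int) (d : Bool) (s t : Nat) (h : RunFrom nums d s t) :
    RunFrom nums (!d) (s + 1) t := by
  intro j h1 h2
  have hj := h j (by omega) h2
  cases d <;> simp only [Bool.not_true, Bool.not_false] at * <;>
    exact ⟨fun hp => (hj.2 (by omega)), fun hp => (hj.1 (by omega))⟩

lemma run_le_RF (nums : List Int) :
    ∀ (k s t : Nat) (d : Bool), t - s = k → s ≤ t → t < nums.length → RunFrom nums d s t →
      (t : Int) - s + 1 ≤ (if d then (RF nums s).1 else (RF nums s).2) := by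
  intro k
  induction k with
  | zero =>
    intro s t d hk hst ht _
    have hts : t = s := by omega
    have := RF_pos nums s
    cases d <;> simp <;> omega
  | succ k ih =>
    intro s t d hk hst ht hrun
    have hlt : s < t := by omega
    have hstep := hrun s (le_refl s) hlt
    have hs1 : s + 1 < nums.length := by omega
    have hih := ih (s + 1) t (!d) (by omega) (by omega) ht (runShift nums d s t hrun)
    cases d
    · have hdown : gD nums (s + 1) < gD nums s := by simpa using hstep.1 (by omega)
      have h2 : (RF nums s).2 = (RF nums (s + 1)).1 + 1 := by
        rw [RF_succ nums s hs1]; simp [hdown]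
      simp only [Bool.not_false] at hih
      simp at hih ⊢
      omega
    · have hup : gD nums s < gD nums (s + 1) := by simpa using hstep.1 (by omega)
      have h2 : (RF nums s).1 = (RF nums (s + 1)).2 + 1 := by
        rw [RF_succ nums s hs1]; simp [hup]
      simp only [Bool.not_true] at hih
      simp at hih ⊢
      omega

lemma RF_realize (nums : List Int) :
    ∀ (k s : Nat) (d : Bool), nums.length - s = k → s < nums.length →
      ∃ t, s ≤ t ∧ t < nums.length ∧
        (if d then (RF nums s).1 else (RF nums s).2) = (t : Int) - s + 1 ∧ RunFrom nums d s t := by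
  intro k
  induction k with
  | zero => intro s d hk hs; omega
  | succ k ih =>
    intro s d hk hs
    by_cases h1 : s + 1 < nums.length
    · by_cases hstep : if d then gD nums s < gD nums (s + 1) else gD nums (s + 1) < gD nums s
      · obtain ⟨t, ht1, ht2, ht3, ht4⟩ := ih (s + 1) (!d) (by omega) h1
        refine ⟨t, by omega, ht2, ?_, ?_⟩
        · rw [RF_succ nums s h1]
          cases d
          · simp only [Bool.not_false] at ht3
            simp at hstep ⊢
            simp [hstep] at ht3 ⊢
            omega
          · simp only [Bool.not_true] at ht3
            simp at hstep ⊢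
            simp [hstep] at ht3 ⊢
            omega
        · intro j hj1 hj2
          rcases Nat.eq_or_lt_of_le hj1 with heq | hlt
          · subst heq
            constructor
            · intro _
              cases d <;> simpa using hstep
            · intro hp; omega
          · have := ht4 j (by omega) hj2
            cases d <;> simp only [Bool.not_true, Bool.not_false] at this <;>
              exact ⟨fun hp => this.2 (by omega), fun hp => this.1 (by omega)⟩
      · refine ⟨s, le_refl s, hs, ?_, ?_⟩
        · rw [RF_succ nums s h1]
          cases d <;> simp at hstep ⊢ <;> intro hcon <;> omega
        · intro j hj1 hj2; omega
    · refine ⟨s, le_refl s, hs, ?_, fun j hj1 hj2 => by omega⟩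
      rw [RF_last nums s h1]
      cases d <;> simp


-- the two "extend an already-removed run" values inside MF's step
def U0 (nums : List Int) (i : Nat) : Int :=
  if 0 < (MF nums i).2 ∧ gD nums i < gD nums (i + 1) then (MF nums i).2 + 1 else 0
def D0 (nums : List Int) (i : Nat) : Int :=
  if 0 < (MF nums i).1 ∧ gD nums (i + 1) < gD nums i then (MF nums i).1 + 1 else 0

lemma MF_succ_eq (nums : List Int) (i : Nat) : MF nums (i + 1) =
    if 1 ≤ i then
      (if gD nums (i - 1) < gD nums (i + 1) then (max (U0 nums i) ((LF nums (i - 1)).2 + 1), D0 nums i)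
       else if gD nums (i + 1) < gD nums (i - 1) then (U0 nums i, max (D0 nums i) ((LF nums (i - 1)).1 + 1))
       else (U0 nums i, D0 nums i))
    else (U0 nums i, D0 nums i) := by
  simp only [MF, U0, D0]

lemma U0_le (nums : List Int) (i : Nat) : U0 nums i ≤ (MF nums (i + 1)).1 := by
  rw [MF_succ_eq] ; split <;> [skip; omega] ; split <;> [simp; skip] ; split <;> simp
lemma D0_le (nums : List Int) (i : Nat) : D0 nums i ≤ (MF nums (i + 1)).2 := by
  rw [MF_succ_eq] ; split <;> [skip; omega] ; split <;> [simp; skip] ; split <;> simp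
lemma MF_new_ge_u (nums : List Int) (i : Nat) (h1 : 1 ≤ i)
    (h : gD nums (i - 1) < gD nums (i + 1)) : (LF nums (i - 1)).2 + 1 ≤ (MF nums (i + 1)).1 := by
  rw [MF_succ_eq, if_pos h1, if_pos h] ; simp
lemma MF_new_ge_d (nums : List Int) (i : Nat) (h1 : 1 ≤ i)
    (h : gD nums (i + 1) < gD nums (i - 1)) : (LF nums (i - 1)).1 + 1 ≤ (MF nums (i + 1)).2 := by
  rw [MF_succ_eq, if_pos h1, if_neg (by omega), if_pos h] ; simp

lemma MF_fst_cases (nums : List Int) (i : Nat) : (MF nums (i + 1)).1 = U0 nums i ∨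
    (1 ≤ i ∧ gD nums (i - 1) < gD nums (i + 1) ∧
      (MF nums (i + 1)).1 = max (U0 nums i) ((LF nums (i - 1)).2 + 1)) := by
  rw [MF_succ_eq]
  split
  · split
    · right; exact ⟨by omega, by assumption, by simp⟩
    · split <;> simp
  · simp
lemma MF_snd_cases (nums : List Int) (i : Nat) : (MF nums (i + 1)).2 = D0 nums i ∨
    (1 ≤ i ∧ gD nums (i + 1) < gD nums (i - 1) ∧
      (MF nums (i + 1)).2 = max (D0 nums i) ((LF nums (i - 1)).1 + 1)) := by
  rw [MF_succ_eq]
  split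
  · split
    · simp
    · split
      · right; exact ⟨by omega, by assumption, by simp⟩
      · simp
  · simp

lemma one_le_BF (nums : List Int) (i : Nat) : 1 ≤ BF nums i := by
  induction i with
  | zero => exact le_refl 1
  | succ i ih => simp only [BF] ; omega

lemma BF_mono (nums : List Int) (i j : Nat) (h : i ≤ j) : BF nums i ≤ BF nums j := by
  induction j with
  | zero => simp_all
  | succ j ih =>
    rcases Nat.eq_or_lt_of_le h with heq | hlt
    · exact heq ▸ le_refl _
    · have := ih (by omega)
      simp only [BF] ; omega

lemma LF_le_BF (nums : List Int) (j i : Nat) (h : j ≤ i) :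
    (LF nums j).1 ≤ BF nums i ∧ (LF nums j).2 ≤ BF nums i := by
  match j with
  | 0 =>
    have := one_le_BF nums i
    constructor <;> simp [LF] <;> omega
  | j + 1 =>
    have h1 : BF nums (j + 1) ≤ BF nums i := BF_mono nums _ _ h
    simp only [BF] at h1
    omega

lemma MF_le_BF (nums : List Int) (j i : Nat) (h : j ≤ i) :
    (MF nums j).1 ≤ BF nums i ∧ (MF nums j).2 ≤ BF nums i := by
  match j with
  | 0 =>
    have := one_le_BF nums i
    constructor <;> simp [MF] <;> omega
  | j + 1 =>
    have h1 : BF nums (j + 1) ≤ BF nums i := BF_mono nums _ _ h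
    simp only [BF] at h1
    omega

-- along the run after a removal at p, B's removed-run state dominates the growing count
lemma chain_ge (nums : List Int) (p : Nat) (d : Bool) (t : Nat) (hp : 1 ≤ p)
    (hj : Junc nums p d) (hrun : RunFrom nums (!d) (p + 1) t) :
    ∀ k, p + 1 ≤ k → k ≤ t →
      LeftVal nums p d + ((k : Int) - p) ≤
        (if (k - p) % 2 = 1 then (if d then (MF nums k).1 else (MF nums k).2)
         else (if d then (MF nums k).2 else (MF nums k).1)) := by
  intro k hk
  induction k, hk using Nat.le_induction with
  | base =>
    intro _
    have hpar : (p + 1 - p) % 2 = 1 := by omega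
    rw [if_pos hpar]
    cases d
    · have hc : gD nums (p + 1) < gD nums (p - 1) := by simpa [Junc] using hj
      have := MF_new_ge_d nums p hp hc
      simp [LeftVal] ; omega
    · have hc : gD nums (p - 1) < gD nums (p + 1) := by simpa [Junc] using hj
      have := MF_new_ge_u nums p hp hc
      simp [LeftVal] ; omega
  | succ k hk ih =>
    intro hkt
    have hih := ih (by omega)
    have hLV : 1 ≤ LeftVal nums p d := by
      have := LF_pos nums (p - 1)
      cases d <;> simp [LeftVal] <;> omega
    have hstep := hrun k (by omega) (by omega)
    by_cases hr : (k - p) % 2 = 1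
    · -- state at k has direction d; step at k goes opposite to d
      rw [if_pos hr] at hih
      have hpar : (k + 1 - p) % 2 = 1 → False := by omega
      rw [if_neg hpar]
      have hparstep : (k - (p + 1)) % 2 = 0 := by omega
      cases d
      · -- state .2 at k; step up
        have hup : gD nums k < gD nums (k + 1) := by
          have := hstep.1 hparstep ; simpa using this
        have hpos : 0 < (MF nums k).2 := by simp at hih ⊢ ; omega
        have hU0 : U0 nums k = (MF nums k).2 + 1 := by simp [U0, hpos, hup]
        have := U0_le nums k
        simp at hih ⊢ ; push_cast at * ; omega
      · -- state .1 at k; step down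
        have hdown : gD nums (k + 1) < gD nums k := by
          have := hstep.1 hparstep ; simpa using this
        have hpos : 0 < (MF nums k).1 := by simp at hih ⊢ ; omega
        have hD0 : D0 nums k = (MF nums k).1 + 1 := by simp [D0, hpos, hdown]
        have := D0_le nums k
        simp at hih ⊢ ; push_cast at * ; omega
    · -- state at k has direction opposite to d; step in direction d
      rw [if_neg hr] at hih
      have hpar : (k + 1 - p) % 2 = 1 := by omega
      rw [if_pos hpar]
      have hparstep : (k - (p + 1)) % 2 = 1 := by omega
      cases d
      · -- state .1 at k; step down
        have hdown : gD nums (k + 1) < gD nums k := by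
          have := hstep.2 hparstep ; simpa using this
        have hpos : 0 < (MF nums k).1 := by simp at hih ⊢ ; omega
        have hD0 : D0 nums k = (MF nums k).1 + 1 := by simp [D0, hpos, hdown]
        have := D0_le nums k
        simp at hih ⊢ ; push_cast at * ; omega
      · -- state .2 at k; step up
        have hup : gD nums k < gD nums (k + 1) := by
          have := hstep.2 hparstep ; simpa using this
        have hpos : 0 < (MF nums k).2 := by simp at hih ⊢ ; omega
        have hU0 : U0 nums k = (MF nums k).2 + 1 := by simp [U0, hpos, hup]
        have := U0_le nums k
        simp at hih ⊢ ; push_cast at * ; omega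

lemma cand_le_BF (nums : List Int) (p : Nat) (d : Bool) (hp : 1 ≤ p)
    (hpn : p + 1 < nums.length) (hj : Junc nums p d) :
    Cand nums p d ≤ BF nums (nums.length - 1) := by
  obtain ⟨t, ht1, ht2, ht3, ht4⟩ :=
    RF_realize nums (nums.length - (p + 1)) (p + 1) (!d) rfl hpn
  have hchain := chain_ge nums p d t hp hj ht4 t ht1 (le_refl t)
  have hMF := MF_le_BF nums t (nums.length - 1) (by omega)
  have hcand : Cand nums p d = LeftVal nums p d + ((t : Int) - (p + 1) + 1) := by
    unfold Cand
    cases d <;> simp at ht3 ⊢ <;> omega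
  rw [hcand]
  split_ifs at hchain <;> cases d <;> simp_all <;> omega


-- every positive removed-run state of B is witnessed by a removal position p and a run
lemma MF_rep (nums : List Int) : ∀ i : Nat,
    (0 < (MF nums i).1 → ∃ p d, 1 ≤ p ∧ p + 1 ≤ i ∧ Junc nums p d ∧
      ((i - p) % 2 = if d then 1 else 0) ∧
      (MF nums i).1 ≤ LeftVal nums p d + ((i : Int) - p) ∧ RunFrom nums (!d) (p + 1) i) ∧
    (0 < (MF nums i).2 → ∃ p d, 1 ≤ p ∧ p + 1 ≤ i ∧ Junc nums p d ∧
      ((i - p) % 2 = if d then 0 else 1) ∧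
      (MF nums i).2 ≤ LeftVal nums p d + ((i : Int) - p) ∧ RunFrom nums (!d) (p + 1) i) := by
  intro i
  induction i with
  | zero => constructor <;> intro h <;> simp [MF] at h
  | succ i ih =>
    constructor
    · intro hpos
      -- either the extension value U0, or the fresh removal at p = i
      rcases MF_fst_cases nums i with hc | ⟨h1, hcmp, hc⟩
      · -- value is U0: must be a genuine extension
        rw [hc] at hpos ⊢
        have hU : 0 < (MF nums i).2 ∧ gD nums i < gD nums (i + 1) := by
          by_contra hcon ; simp [U0, hcon] at hpos
        have hU0 : U0 nums i = (MF nums i).2 + 1 := by simp [U0, hU.1, hU.2]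
        obtain ⟨p, d, hp, hpi, hj, hpar, hle, hrun⟩ := ih.2 hU.1
        refine ⟨p, d, hp, by omega, hj, by cases d <;> simp at hpar ⊢ <;> omega, ?_, ?_⟩
        · rw [hU0] ; push_cast at * ; omega
        · intro j hj1 hj2
          rcases Nat.lt_or_ge j i with hji | hji
          · exact hrun j hj1 hji
          · have hji' : j = i := by omega
            subst hji'
            constructor
            · intro hper
              -- step at i is up; expected direction must be up
              cases d <;> simp at hpar ⊢ <;> first | exact hU.2 | omega
            · intro hper
              cases d <;> simp at hpar ⊢ <;> first | exact hU.2 | omega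
      · -- fresh removal at p = i may win the max
        rcases max_cases (U0 nums i) ((LF nums (i - 1)).2 + 1) with ⟨hmax, _⟩ | ⟨hmax, _⟩
        · -- U0 wins: same as extension case
          rw [hc, hmax] at hpos ⊢
          have hU : 0 < (MF nums i).2 ∧ gD nums i < gD nums (i + 1) := by
            by_contra hcon ; simp [U0, hcon] at hpos
          have hU0 : U0 nums i = (MF nums i).2 + 1 := by simp [U0, hU.1, hU.2]
          obtain ⟨p, d, hp, hpi, hj, hpar, hle, hrun⟩ := ih.2 hU.1
          refine ⟨p, d, hp, by omega, hj, by cases d <;> simp at hpar ⊢ <;> omega, ?_, ?_⟩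
          · rw [hU0] ; push_cast at * ; omega
          · intro j hj1 hj2
            rcases Nat.lt_or_ge j i with hji | hji
            · exact hrun j hj1 hji
            · have hji' : j = i := by omega
              subst hji'
              constructor
              · intro hper
                cases d <;> simp at hpar ⊢ <;> first | exact hU.2 | omega
              · intro hper
                cases d <;> simp at hpar ⊢ <;> first | exact hU.2 | omega
        · -- fresh removal wins
          refine ⟨i, true, h1, by omega, by simpa [Junc] using hcmp, by simp, ?_, ?_⟩
          · rw [hc, hmax] ; simp [LeftVal]
          · intro j hj1 hj2 ; omega
    · intro hpos
      rcases MF_snd_cases nums i with hc | ⟨h1, hcmp, hc⟩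
      · rw [hc] at hpos ⊢
        have hU : 0 < (MF nums i).1 ∧ gD nums (i + 1) < gD nums i := by
          by_contra hcon ; simp [D0, hcon] at hpos
        have hD0 : D0 nums i = (MF nums i).1 + 1 := by simp [D0, hU.1, hU.2]
        obtain ⟨p, d, hp, hpi, hj, hpar, hle, hrun⟩ := ih.1 hU.1
        refine ⟨p, d, hp, by omega, hj, by cases d <;> simp at hpar ⊢ <;> omega, ?_, ?_⟩
        · rw [hD0] ; push_cast at * ; omega
        · intro j hj1 hj2
          rcases Nat.lt_or_ge j i with hji | hji
          · exact hrun j hj1 hji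
          · have hji' : j = i := by omega
            subst hji'
            constructor
            · intro hper
              cases d <;> simp at hpar ⊢ <;> first | exact hU.2 | omega
            · intro hper
              cases d <;> simp at hpar ⊢ <;> first | exact hU.2 | omega
      · rcases max_cases (D0 nums i) ((LF nums (i - 1)).1 + 1) with ⟨hmax, _⟩ | ⟨hmax, _⟩
        · rw [hc, hmax] at hpos ⊢
          have hU : 0 < (MF nums i).1 ∧ gD nums (i + 1) < gD nums i := by
            by_contra hcon ; simp [D0, hcon] at hpos
          have hD0 : D0 nums i = (MF nums i).1 + 1 := by simp [D0, hU.1, hU.2]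
          obtain ⟨p, d, hp, hpi, hj, hpar, hle, hrun⟩ := ih.1 hU.1
          refine ⟨p, d, hp, by omega, hj, by cases d <;> simp at hpar ⊢ <;> omega, ?_, ?_⟩
          · rw [hD0] ; push_cast at * ; omega
          · intro j hj1 hj2
            rcases Nat.lt_or_ge j i with hji | hji
            · exact hrun j hj1 hji
            · have hji' : j = i := by omega
              subst hji'
              constructor
              · intro hper
                cases d <;> simp at hpar ⊢ <;> first | exact hU.2 | omega
              · intro hper
                cases d <;> simp at hpar ⊢ <;> first | exact hU.2 | omega
        · refine ⟨i, false, h1, by omega, by simpa [Junc] using hcmp, by simp, ?_, ?_⟩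
          · rw [hc, hmax] ; simp [LeftVal]
          · intro j hj1 hj2 ; omega

-- hence every positive removed-run state is at most one of A's combine candidates
lemma MF_le_cand (nums : List Int) (i : Nat) (hi : i < nums.length) :
    (0 < (MF nums i).1 → ∃ p d, 1 ≤ p ∧ p + 1 < nums.length ∧ Junc nums p d ∧
        (MF nums i).1 ≤ Cand nums p d) ∧
    (0 < (MF nums i).2 → ∃ p d, 1 ≤ p ∧ p + 1 < nums.length ∧ Junc nums p d ∧
        (MF nums i).2 ≤ Cand nums p d) := by
  constructor
  · intro hpos
    obtain ⟨p, d, hp, hpi, hj, _, hle, hrun⟩ := (MF_rep nums i).1 hpos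
    refine ⟨p, d, hp, by omega, hj, ?_⟩
    have hrf := run_le_RF nums (i - (p + 1)) (p + 1) i (!d) rfl (by omega) hi hrun
    unfold Cand
    cases d <;> simp at hrf ⊢ <;> push_cast at * <;> omega
  · intro hpos
    obtain ⟨p, d, hp, hpi, hj, _, hle, hrun⟩ := (MF_rep nums i).2 hpos
    refine ⟨p, d, hp, by omega, hj, ?_⟩
    have hrf := run_le_RF nums (i - (p + 1)) (p + 1) i (!d) rfl (by omega) hi hrun
    unfold Cand
    cases d <;> simp at hrf ⊢ <;> push_cast at * <;> omega


lemma foldl_max_le {β : Type} (l : List β) (f : β → Int) (B : Int) :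
    ∀ a, a ≤ B → (∀ x ∈ l, f x ≤ B) → l.foldl (fun acc x => max acc (f x)) a ≤ B := by
  induction l with
  | nil => intro a ha _ ; simpa
  | cons x t ih =>
      intro a ha hf
      simp only [List.foldl_cons]
      exact ih _ (max_le ha (hf x (by simp))) (fun y hy => hf y (by simp [hy]))

lemma map_range_congr {α : Type} (n : Nat) (f g : Nat → α) (h : ∀ j < n, f j = g j) :
    (List.range n).map f = (List.range n).map g :=
  List.map_congr_left (fun j hj => h j (List.mem_range.mp hj))

lemma repl_eq_map_range {α : Type} (n : Nat) (c : α) (f : Nat → α) (h : ∀ j < n, f j = c) :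
    List.replicate n c = (List.range n).map f := by
  rw [map_range_congr n f (fun _ => c) h, List.map_const', List.length_range]

lemma map_range_set {α : Type} (n m : Nat) (f : Nat → α) (v : α) (hm : m < n) :
    ((List.range n).map f).set m v = (List.range n).map (fun j => if j = m then v else f j) := by
  apply List.ext_getElem
  · simp
  · intro j h1 h2
    simp only [List.length_set, List.length_map, List.length_range] at h1
    rw [List.getElem_set]
    by_cases hj : j = m <;> simp [hj] <;> intro hmj <;> exact absurd hmj.symm hj

lemma LF_fst_eq (nums : List Int) (m : Nat) (h : 1 ≤ m) :
    (LF nums m).1 = if gD nums (m - 1) < gD nums m then (LF nums (m - 1)).2 + 1 else 1 := by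
  obtain ⟨k, rfl⟩ : ∃ k, m = k + 1 := ⟨m - 1, by omega⟩
  simp [LF]

lemma LF_snd_eq (nums : List Int) (m : Nat) (h : 1 ≤ m) :
    (LF nums m).2 = if gD nums m < gD nums (m - 1) then (LF nums (m - 1)).1 + 1 else 1 := by
  obtain ⟨k, rfl⟩ : ∃ k, m = k + 1 := ⟨m - 1, by omega⟩
  simp [LF]

lemma upd_eq (m : Nat) (F : Nat → Int) (v : Int) (hv : v = F m) (j : Nat) :
    (if j = m then v else if j < m then F j else 1) = if j < m + 1 then F j else 1 := by
  rcases Nat.lt_trichotomy j m with h | h | h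
  · rw [if_neg (by omega), if_pos h, if_pos (by omega)]
  · subst h ; rw [if_pos rfl, if_pos (by omega)] ; exact hv
  · rw [if_neg (by omega), if_neg (by omega), if_neg (by omega)]

-- first loop of A: after processing range(1, m) the arrays hold LF below m and 1 above
lemma A_loop1 (nums : List Int) : ∀ m : Nat, 1 ≤ m → m ≤ nums.length →
    (PySem.List.pyRange 1 (m : Int) 1).foldl (aStep1 nums)
        (List.replicate nums.length (1 : Int), List.replicate nums.length (1 : Int)) =
      ((List.range nums.length).map (fun j => if j < m then (LF nums j).1 else 1),
       (List.range nums.length).map (fun j => if j < m then (LF nums j).2 else 1)) := by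
  intro m hm1
  induction m, hm1 using Nat.le_induction with
  | base =>
    intro _
    rw [show ((1 : Nat) : Int) = 1 by norm_num, PySem.List.pyRange_one_eq_nil (by norm_num)]
    simp only [List.foldl_nil]
    refine Prod.ext ?_ ?_ <;> simp only [] <;>
      refine repl_eq_map_range _ _ _ (fun j hj => ?_) <;>
      rcases Nat.eq_zero_or_pos j with rfl | hjp <;> simp [LF] <;> omega
  | succ m hm1 ih =>
    intro hmn
    have hmlt : m < nums.length := by omega
    have hm1lt : m - 1 < nums.length := by omega
    rw [show ((m + 1 : Nat) : Int) = (m : Int) + 1 by push_cast ; ring,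
        PySem.List.pyRange_one_succ_right (by exact_mod_cast hm1), List.foldl_append,
        ih (by omega)]
    simp only [List.foldl_cons, List.foldl_nil]
    unfold aStep1
    have hidx : (m : Int) - 1 = ((m - 1 : Nat) : Int) := by omega
    have hnums : ∀ (k : Nat), PySem.List.pyGetD nums (k : Int) 0 = gD nums k := by
      intro k ; simp [PySem.List.pyGetD_natCast, gD]
    have harr : ∀ (f : Nat → Int) (k : Nat), k < nums.length →
        PySem.List.pyGetD ((List.range nums.length).map f) (k : Int) 0 = f k := by
      intro f k hk
      rw [PySem.List.pyGetD_natCast]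
      exact PySem.List.getD_map_range f nums.length k 0 hk
    have hset : ∀ (f : Nat → Int) (v : Int),
        PySem.List.pySetD ((List.range nums.length).map f) (m : Int) v =
          (List.range nums.length).map (fun j => if j = m then v else f j) := by
      intro f v
      simp [PySem.List.pySetD_natCast, map_range_set nums.length m f v hmlt]
    rw [hidx, hnums, hnums]
    have hmm : m - 1 < m := by omega
    simp only [harr _ _ hm1lt, hset, if_pos hmm]
    have hL1 := LF_fst_eq nums m hm1
    have hL2 := LF_snd_eq nums m hm1
    by_cases hup : gD nums (m - 1) < gD nums m
    · rw [if_pos hup]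
      refine Prod.ext ?_ ?_ <;> simp only []
      · exact map_range_congr _ _ _ (fun j hj =>
          upd_eq m (fun j => (LF nums j).1) ((LF nums (m - 1)).2 + 1) (by simp only [hL1, if_pos hup]) j)
      · exact map_range_congr _ _ _ (fun j hj =>
          upd_eq m (fun j => (LF nums j).2) 1 (by simp only [hL2] ; rw [if_neg (by omega)]) j)
    · rw [if_neg hup]
      by_cases hdn : gD nums m < gD nums (m - 1)
      · rw [if_pos hdn]
        refine Prod.ext ?_ ?_ <;> simp only []
        · exact map_range_congr _ _ _ (fun j hj =>
            upd_eq m (fun j => (LF nums j).1) 1 (by simp only [hL1] ; rw [if_neg hup]) j)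
        · exact map_range_congr _ _ _ (fun j hj =>
            upd_eq m (fun j => (LF nums j).2) ((LF nums (m - 1)).1 + 1) (by simp only [hL2, if_pos hdn]) j)
      · rw [if_neg hdn]
        refine Prod.ext ?_ ?_ <;> simp only []
        · exact map_range_congr _ _ _ (fun j hj =>
            upd_eq m (fun j => (LF nums j).1) 1 (by simp only [hL1] ; rw [if_neg hup]) j)
        · exact map_range_congr _ _ _ (fun j hj =>
            upd_eq m (fun j => (LF nums j).2) 1 (by simp only [hL2] ; rw [if_neg hdn]) j)


lemma RF_fst_eq (nums : List Int) (q : Nat) (h : q + 1 < nums.length) :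
    (RF nums q).1 = if gD nums q < gD nums (q + 1) then (RF nums (q + 1)).2 + 1 else 1 := by
  rw [RF_succ nums q h]

lemma RF_snd_eq (nums : List Int) (q : Nat) (h : q + 1 < nums.length) :
    (RF nums q).2 = if gD nums (q + 1) < gD nums q then (RF nums (q + 1)).1 + 1 else 1 := by
  rw [RF_succ nums q h]

lemma upd_eq2 (q : Nat) (F : Nat → Int) (v : Int) (hv : v = F q) (j : Nat) :
    (if j = q then v else if q + 1 ≤ j then F j else 1) = if q ≤ j then F j else 1 := by
  rcases Nat.lt_trichotomy j q with h | h | h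
  · rw [if_neg (by omega), if_neg (by omega), if_neg (by omega)]
  · subst h ; rw [if_pos rfl, if_pos (by omega)] ; exact hv
  · rw [if_neg (by omega), if_pos (by omega), if_pos (by omega)]

-- second loop of A: after m countdown iterations the arrays hold RF from n-1-m upwards
lemma A_loop2 (nums : List Int) : ∀ m : Nat, m ≤ nums.length - 1 →
    ((List.range m).map (fun k : Nat => ((nums.length : Int) - 2) - (k : Int))).foldl (aStep2 nums)
        (List.replicate nums.length (1 : Int), List.replicate nums.length (1 : Int)) =
      ((List.range nums.length).map (fun j => if nums.length - 1 - m ≤ j then (RF nums j).1 else 1),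
       (List.range nums.length).map (fun j => if nums.length - 1 - m ≤ j then (RF nums j).2 else 1)) := by
  intro m
  induction m with
  | zero =>
    intro _
    simp only [List.range_zero, List.map_nil, List.foldl_nil, Nat.sub_zero]
    refine Prod.ext ?_ ?_ <;> simp only [] <;>
      refine repl_eq_map_range _ _ _ (fun j hj => ?_)
    all_goals
      by_cases hcase : nums.length - 1 ≤ j
      · rw [if_pos hcase, RF_last nums j (by omega)]
      · rw [if_neg hcase]
  | succ m ih =>
    intro hmn
    have hq2 : m + 2 ≤ nums.length := by omega
    set q : Nat := nums.length - 2 - m with hqdef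
    have hq1 : q + 1 < nums.length := by omega
    have hqn : q < nums.length := by omega
    have hprev : nums.length - 1 - m = q + 1 := by omega
    have hnext : nums.length - 1 - (m + 1) = q := by omega
    rw [List.range_succ, List.map_append, List.foldl_append, ih (by omega)]
    simp only [List.map_cons, List.map_nil, List.foldl_cons, List.foldl_nil]
    unfold aStep2
    have hidx : (nums.length : Int) - 2 - m = (q : Int) := by omega
    have hidx1 : ((nums.length : Int) - 2 - m) + 1 = ((q + 1 : Nat) : Int) := by omega
    have hnums : ∀ (k : Nat), PySem.List.pyGetD nums (k : Int) 0 = gD nums k := by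
      intro k ; simp [PySem.List.pyGetD_natCast, gD]
    have harr : ∀ (f : Nat → Int), ∀ k < nums.length,
        PySem.List.pyGetD ((List.range nums.length).map f) (k : Int) 0 = f k := by
      intro f k hk
      rw [PySem.List.pyGetD_natCast]
      exact PySem.List.getD_map_range f nums.length k 0 hk
    have hset : ∀ (f : Nat → Int) (v : Int),
        PySem.List.pySetD ((List.range nums.length).map f) (q : Int) v =
          (List.range nums.length).map (fun j => if j = q then v else f j) := by
      intro f v
      simp [PySem.List.pySetD_natCast, map_range_set nums.length q f v hqn]
    rw [hidx1, hidx, hnums, hnums]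
    have hcnd : q + 1 ≤ q + 1 := le_refl _
    simp only [hprev, hnext, harr _ _ hq1, hset, if_pos hcnd]
    have hR1 := RF_fst_eq nums q hq1
    have hR2 := RF_snd_eq nums q hq1
    by_cases hup : gD nums q < gD nums (q + 1)
    · rw [if_pos hup]
      refine Prod.ext ?_ ?_ <;> simp only []
      · exact map_range_congr _ _ _ (fun j hj =>
          upd_eq2 q (fun j => (RF nums j).1) ((RF nums (q + 1)).2 + 1)
            (by simp only [hR1, if_pos hup]) j)
      · exact map_range_congr _ _ _ (fun j hj =>
          upd_eq2 q (fun j => (RF nums j).2) 1 (by simp only [hR2] ; rw [if_neg (by omega)]) j)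
    · rw [if_neg hup]
      by_cases hdn : gD nums (q + 1) < gD nums q
      · rw [if_pos hdn]
        refine Prod.ext ?_ ?_ <;> simp only []
        · exact map_range_congr _ _ _ (fun j hj =>
            upd_eq2 q (fun j => (RF nums j).1) 1 (by simp only [hR1] ; rw [if_neg hup]) j)
        · exact map_range_congr _ _ _ (fun j hj =>
            upd_eq2 q (fun j => (RF nums j).2) ((RF nums (q + 1)).1 + 1)
              (by simp only [hR2, if_pos hdn]) j)
      · rw [if_neg hdn]
        refine Prod.ext ?_ ?_ <;> simp only []
        · exact map_range_congr _ _ _ (fun j hj =>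
            upd_eq2 q (fun j => (RF nums j).1) 1 (by simp only [hR1] ; rw [if_neg hup]) j)
        · exact map_range_congr _ _ _ (fun j hj =>
            upd_eq2 q (fun j => (RF nums j).2) 1 (by simp only [hR2] ; rw [if_neg hdn]) j)


-- B's loop state after processing range(1, k+1)
lemma B_loop (nums : List Int) : ∀ k : Nat, k + 1 ≤ nums.length →
    (PySem.List.pyRange 1 ((k + 1 : Nat) : Int) 1).foldl (bStep nums) ⟨1, 1, 1, 0, 0, 0, 0⟩ =
      ⟨BF nums k, (LF nums k).1, (LF nums k).2,
       (if 1 ≤ k then (LF nums (k - 1)).1 else 0), (if 1 ≤ k then (LF nums (k - 1)).2 else 0),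
       (MF nums k).1, (MF nums k).2⟩ := by
  intro k
  induction k with
  | zero =>
    intro _
    rw [show ((0 + 1 : Nat) : Int) = 1 by norm_num, PySem.List.pyRange_one_eq_nil (by norm_num)]
    simp [LF, MF, BF]
  | succ k ih =>
    intro hk
    rw [show ((k + 1 + 1 : Nat) : Int) = ((k + 1 : Nat) : Int) + 1 by push_cast ; ring,
        PySem.List.pyRange_one_succ_right (by push_cast ; omega), List.foldl_append, ih (by omega)]
    simp only [List.foldl_cons, List.foldl_nil]
    unfold bStep
    have hnums : ∀ (j : Nat), PySem.List.pyGetD nums (j : Int) 0 = gD nums j := by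
      intro j ; simp [PySem.List.pyGetD_natCast, gD]
    have hia : ((k + 1 : Nat) : Int) - 1 = (k : Nat) := by omega
    rw [hia, hnums, hnums]
    simp only []
    -- components
    have hup : (if gD nums k < gD nums (k + 1) then (LF nums k).2 + 1 else 1) = (LF nums (k + 1)).1 := by
      simp [LF]
    have hdn : (if gD nums (k + 1) < gD nums k then (LF nums k).1 + 1 else 1) = (LF nums (k + 1)).2 := by
      simp [LF]
    have hrem :
        (if 2 ≤ ((k + 1 : Nat) : Int) then
          (if PySem.List.pyGetD nums (((k + 1 : Nat) : Int) - 2) 0 < gD nums (k + 1) then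
             (max (if 0 < (MF nums k).2 ∧ gD nums k < gD nums (k + 1) then (MF nums k).2 + 1 else 0)
                  ((if 1 ≤ k then (LF nums (k - 1)).2 else 0) + 1),
              (if 0 < (MF nums k).1 ∧ gD nums (k + 1) < gD nums k then (MF nums k).1 + 1 else 0))
           else if gD nums (k + 1) < PySem.List.pyGetD nums (((k + 1 : Nat) : Int) - 2) 0 then
             ((if 0 < (MF nums k).2 ∧ gD nums k < gD nums (k + 1) then (MF nums k).2 + 1 else 0),
              max (if 0 < (MF nums k).1 ∧ gD nums (k + 1) < gD nums k then (MF nums k).1 + 1 else 0)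
                  ((if 1 ≤ k then (LF nums (k - 1)).1 else 0) + 1))
           else
             ((if 0 < (MF nums k).2 ∧ gD nums k < gD nums (k + 1) then (MF nums k).2 + 1 else 0),
              (if 0 < (MF nums k).1 ∧ gD nums (k + 1) < gD nums k then (MF nums k).1 + 1 else 0)))
         else
          ((if 0 < (MF nums k).2 ∧ gD nums k < gD nums (k + 1) then (MF nums k).2 + 1 else 0),
           (if 0 < (MF nums k).1 ∧ gD nums (k + 1) < gD nums k then (MF nums k).1 + 1 else 0))) =
        ((MF nums (k + 1)).1, (MF nums (k + 1)).2) := by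
      rcases Nat.eq_zero_or_pos k with rfl | hk1
      · rw [if_neg (by norm_num)]
        have hMF := MF_succ_eq nums 0
        rw [if_neg (by omega)] at hMF
        rw [hMF]
        simp [MF, U0, D0]
      · rw [if_pos (by push_cast ; omega : (2:Int) ≤ ((k + 1 : Nat) : Int))]
        have hic : ((k + 1 : Nat) : Int) - 2 = ((k - 1 : Nat) : Int) := by omega
        rw [hic, hnums]
        have hMF := MF_succ_eq nums k
        rw [if_pos (show 1 ≤ k from hk1)] at hMF
        rw [hMF]
        simp only [U0, D0]
        have hk1' : 1 ≤ k := hk1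
        by_cases h1 : gD nums (k - 1) < gD nums (k + 1)
        · simp [h1, hk1']
        · by_cases h2 : gD nums (k + 1) < gD nums (k - 1) <;> simp [h1, h2, hk1']
    simp only [hup, hdn, hrem]
    simp [BF]


-- A's combine candidate at loop index i = k+1 (1 in the no-candidate case)
def AC (nums : List Int) (k : Nat) : Int :=
  if gD nums k < gD nums (k + 2) then (LF nums k).2 + (RF nums (k + 2)).2
  else if gD nums (k + 2) < gD nums k then (LF nums k).1 + (RF nums (k + 2)).1
  else 1

-- max(max(lu), max(ld)) of A
def ABase (nums : List Int) : Int :=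
  max ((List.range (nums.length - 1)).foldl (fun a j => max a ((LF nums (j + 1)).1)) 1)
      ((List.range (nums.length - 1)).foldl (fun a j => max a ((LF nums (j + 1)).2)) 1)

-- A's final answer as a pure fold
def AnsF (nums : List Int) : Int :=
  (List.range (nums.length - 2)).foldl (fun a k => max a (AC nums k)) (ABase nums)

lemma alt_eq (nums : List Int) (h : nums ≠ []) :
    longestAlternating_alt nums = BF nums (nums.length - 1) := by
  have hn : 1 ≤ nums.length := by
    rcases nums with _ | ⟨x, t⟩
    · simp at h
    · simp
  unfold longestAlternating_alt
  rw [PySem.List.len_eq,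
      show ((nums.length : Int)) = ((nums.length - 1 + 1 : Nat) : Int) by omega,
      B_loop nums (nums.length - 1) (by omega)]

lemma max_getD_eq (nums : List Int) (hn : 1 ≤ nums.length) (f : Nat → Int) :
    (PySem.List.max? ((List.range nums.length).map f) (fun y => y)).getD 0 =
      (List.range (nums.length - 1)).foldl (fun a j => max a (f (j + 1))) (f 0) := by
  obtain ⟨m, hm⟩ : ∃ m, nums.length = m + 1 := ⟨nums.length - 1, by omega⟩
  rw [hm]
  rw [List.range_succ_eq_map, List.map_cons, PySem.List.max?_id_cons]
  simp only [Option.getD_some, Nat.add_sub_cancel]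
  rw [List.map_map, List.foldl_map]
  rfl

lemma foldl_branch {β : Type} (l : List β) (c1 c2 : β → Prop) [DecidablePred c1]
    [DecidablePred c2] (v1 v2 : β → Int) :
    ∀ a, 1 ≤ a →
      l.foldl (fun ans k => if c1 k then max ans (v1 k) else if c2 k then max ans (v2 k) else ans) a =
        l.foldl (fun ans k => max ans (if c1 k then v1 k else if c2 k then v2 k else 1)) a := by
  induction l with
  | nil => intro a _ ; rfl
  | cons x t ih =>
    intro a ha
    simp only [List.foldl_cons]
    by_cases h1 : c1 x
    · simp only [if_pos h1]
      exact ih _ (le_trans ha (le_max_left _ _))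
    · simp only [if_neg h1]
      by_cases h2 : c2 x
      · simp only [if_pos h2]
        exact ih _ (le_trans ha (le_max_left _ _))
      · simp only [if_neg h2]
        rw [max_eq_left ha]
        exact ih _ ha

lemma one_le_ABase (nums : List Int) : 1 ≤ ABase nums :=
  le_trans (PySem.List.le_foldl_max_int (List.range (nums.length - 1))
    (fun j => (LF nums (j + 1)).1) 1).1 (le_max_left _ _)

lemma ansA_eq (nums : List Int) (h : nums ≠ []) : longestAlternating nums = AnsF nums := by
  have hn : 1 ≤ nums.length := by
    rcases nums with _ | ⟨x, t⟩
    · simp at h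
    · simp
  unfold longestAlternating
  rw [PySem.List.len_eq]
  simp only [Int.toNat_natCast]
  rw [A_loop1 nums nums.length hn (le_refl _)]
  rw [PySem.List.pyRange_neg_one,
      show (((nums.length : Int) - 2) - (-1)).toNat = nums.length - 1 by omega,
      A_loop2 nums (nums.length - 1) (le_refl _)]
  simp only []
  -- ans0 = ABase
  have hdrop1 : ∀ (F : Nat → Int),
      (List.range nums.length).map (fun j => if j < nums.length then F j else 1) =
        (List.range nums.length).map F :=
    fun F => map_range_congr _ _ _ (fun j hj => if_pos hj)
  rw [hdrop1 (fun j => (LF nums j).1), hdrop1 (fun j => (LF nums j).2),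
      max_getD_eq nums hn, max_getD_eq nums hn]
  have hb1 : (LF nums 0).1 = 1 := by simp [LF]
  have hb2 : (LF nums 0).2 = 1 := by simp [LF]
  rw [hb1, hb2]
  -- the combine loop
  rw [PySem.List.pyRange_one,
      show (((nums.length : Int) - 1) - 1).toNat = nums.length - 2 by omega,
      List.foldl_map]
  refine Eq.trans (PySem.List.foldl_congr_mem _ _ (fun (ans : Int) (k : Nat) =>
        if gD nums k < gD nums (k + 2) then max ans ((LF nums k).2 + (RF nums (k + 2)).2)
        else if gD nums (k + 2) < gD nums k then max ans ((LF nums k).1 + (RF nums (k + 2)).1)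
        else ans) _ ?_) ?_
  case refine_2 =>
    rw [foldl_branch (List.range (nums.length - 2))
        (fun k => gD nums k < gD nums (k + 2)) (fun k => gD nums (k + 2) < gD nums k)
        (fun k => (LF nums k).2 + (RF nums (k + 2)).2) (fun k => (LF nums k).1 + (RF nums (k + 2)).1)
        (max _ _) (one_le_ABase nums)]
    rfl
  case refine_1 =>
    intro acc k hk
    have hklt : k < nums.length - 2 := List.mem_range.mp hk
    have hi1 : 1 + (k : Int) - 1 = ((k : Nat) : Int) := by omega
    have hi2 : 1 + (k : Int) + 1 = ((k + 2 : Nat) : Int) := by omega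
    rw [hi1, hi2]
    have hnums : ∀ (j : Nat), PySem.List.pyGetD nums (j : Int) 0 = gD nums j := by
      intro j ; simp [PySem.List.pyGetD_natCast, gD]
    have harr : ∀ (f : Nat → Int), ∀ j < nums.length,
        PySem.List.pyGetD ((List.range nums.length).map f) (j : Int) 0 = f j := by
      intro f j hj
      rw [PySem.List.pyGetD_natCast]
      exact PySem.List.getD_map_range f nums.length j 0 hj
    have hk1 : k < nums.length := by omega
    have hk2 : k + 2 < nums.length := by omega
    have hc : nums.length - 1 - (nums.length - 1) ≤ k + 2 := by omega
    rw [hnums k, hnums (k + 2),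
        harr (fun j => (LF nums j).2) k hk1,
        harr (fun j => if nums.length - 1 - (nums.length - 1) ≤ j then (RF nums j).2 else 1) (k + 2) hk2,
        harr (fun j => (LF nums j).1) k hk1,
        harr (fun j => if nums.length - 1 - (nums.length - 1) ≤ j then (RF nums j).1 else 1) (k + 2) hk2]
    simp

lemma ABase_le_AnsF (nums : List Int) : ABase nums ≤ AnsF nums :=
  (PySem.List.le_foldl_max_int (List.range (nums.length - 2)) (AC nums) (ABase nums)).1

lemma one_le_AnsF (nums : List Int) : 1 ≤ AnsF nums :=
  le_trans (one_le_ABase nums) (ABase_le_AnsF nums)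

lemma AC_le_AnsF (nums : List Int) (k : Nat) (hk : k < nums.length - 2) :
    AC nums k ≤ AnsF nums :=
  (PySem.List.le_foldl_max_int (List.range (nums.length - 2)) (AC nums) (ABase nums)).2
    k (List.mem_range.mpr hk)

lemma cand_le_AC (nums : List Int) (p : Nat) (d : Bool) (hp : 1 ≤ p) (hj : Junc nums p d) :
    Cand nums p d ≤ AC nums (p - 1) := by
  obtain ⟨q, rfl⟩ : ∃ q, p = q + 1 := ⟨p - 1, by omega⟩
  have he : q + 1 + 1 = q + 2 := rfl
  simp only [Nat.add_sub_cancel]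
  unfold AC Cand LeftVal
  simp only [Nat.add_sub_cancel, he]
  cases d
  · have hj' : gD nums (q + 2) < gD nums q := by simpa [Junc, he] using hj
    rw [if_neg (by omega : ¬ gD nums q < gD nums (q + 2)), if_pos hj']
    simp
  · have hj' : gD nums q < gD nums (q + 2) := by simpa [Junc, he] using hj
    rw [if_pos hj']
    simp

lemma core_eq (nums : List Int) (hn : 1 ≤ nums.length) :
    AnsF nums = BF nums (nums.length - 1) := by
  apply le_antisymm
  · -- every candidate of A is dominated by B's running best
    unfold AnsF
    apply foldl_max_le
    · unfold ABase
      apply max_le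
      · exact foldl_max_le _ _ _ 1 (one_le_BF nums _) (fun j hj =>
          (LF_le_BF nums (j + 1) (nums.length - 1)
            (by have := List.mem_range.mp hj ; omega)).1)
      · exact foldl_max_le _ _ _ 1 (one_le_BF nums _) (fun j hj =>
          (LF_le_BF nums (j + 1) (nums.length - 1)
            (by have := List.mem_range.mp hj ; omega)).2)
    · intro k hk
      have hklt := List.mem_range.mp hk
      unfold AC
      by_cases h1 : gD nums k < gD nums (k + 2)
      · rw [if_pos h1]
        have hc := cand_le_BF nums (k + 1) true (by omega) (by omega) (by
          simp only [Junc, Nat.add_sub_cancel, if_pos] ; exact h1)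
        simpa [Cand, LeftVal] using hc
      · rw [if_neg h1]
        by_cases h2 : gD nums (k + 2) < gD nums k
        · rw [if_pos h2]
          have hc := cand_le_BF nums (k + 1) false (by omega) (by omega) (by
            simp only [Junc, Nat.add_sub_cancel] ; simpa using h2)
          simpa [Cand, LeftVal] using hc
        · rw [if_neg h2]
          exact one_le_BF nums _
  · -- every state of B is dominated by A's answer
    have hLFa : ∀ j, j ≤ nums.length - 1 →
        (LF nums j).1 ≤ AnsF nums ∧ (LF nums j).2 ≤ AnsF nums := by
      intro j hj
      match j with
      | 0 =>
        have := one_le_AnsF nums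
        constructor <;> simp [LF] <;> omega
      | j + 1 =>
        have hmem : j ∈ List.range (nums.length - 1) := List.mem_range.mpr (by omega)
        constructor
        · exact le_trans (le_trans
            ((PySem.List.le_foldl_max_int (List.range (nums.length - 1))
              (fun j => (LF nums (j + 1)).1) 1).2 j hmem) (le_max_left _ _))
            (ABase_le_AnsF nums)
        · exact le_trans (le_trans
            ((PySem.List.le_foldl_max_int (List.range (nums.length - 1))
              (fun j => (LF nums (j + 1)).2) 1).2 j hmem) (le_max_right _ _))
            (ABase_le_AnsF nums)
    have hMFa : ∀ i, i ≤ nums.length - 1 →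
        (MF nums i).1 ≤ AnsF nums ∧ (MF nums i).2 ≤ AnsF nums := by
      intro i hi
      have hin : i < nums.length := by omega
      constructor
      · by_cases hpos : 0 < (MF nums i).1
        · obtain ⟨p, d, hp, hpn, hj, hle⟩ := (MF_le_cand nums i hin).1 hpos
          exact le_trans hle (le_trans (cand_le_AC nums p d hp hj)
            (AC_le_AnsF nums (p - 1) (by omega)))
        · exact le_trans (by omega) (one_le_AnsF nums)
      · by_cases hpos : 0 < (MF nums i).2
        · obtain ⟨p, d, hp, hpn, hj, hle⟩ := (MF_le_cand nums i hin).2 hpos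
          exact le_trans hle (le_trans (cand_le_AC nums p d hp hj)
            (AC_le_AnsF nums (p - 1) (by omega)))
        · exact le_trans (by omega) (one_le_AnsF nums)
    have hBF : ∀ i, i ≤ nums.length - 1 → BF nums i ≤ AnsF nums := by
      intro i
      induction i with
      | zero =>
        intro _
        simpa [BF] using one_le_AnsF nums
      | succ i ih =>
        intro hi
        have h1 := ih (by omega)
        have h2 := hLFa (i + 1) hi
        have h3 := hMFa (i + 1) hi
        simp only [BF, max_le_iff]
        exact ⟨h1, ⟨h2.1, h2.2⟩, h3.1, h3.2⟩
    exact hBF (nums.length - 1) (le_refl _)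

theorem longestAlternating_spec : Claim_equal_longestAlternating := by
  intro nums _ hpre
  unfold Pre_longestAlternating at hpre
  unfold Spec_longestAlternating
  have hn : 1 ≤ nums.length := by
    rcases nums with _ | ⟨x, t⟩
    · simp at hpre
    · simp
  rw [ansA_eq nums hpre, alt_eq nums hpre, core_eq nums hn]
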